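-- pv_equiv track=rewrite | github.com/AlexisChup/croque-carotte | mooveRabbit.py | mooveRabbitOnBoard
-- ===== SOURCE A (Python) =====
-- def mooveRabbitOnBoard(Posrabbit, board, valeur):
--     if board[Posrabbit+valeur] == 0:
--         board[Posrabbit+valeur] = board[Posrabbit]
--         board[Posrabbit] = 0
--
--     elif board[Posrabbit+valeur] == 3:
--         board[Posrabbit] = 0
--
--     else:
--         mooveRabbitOnBoard(Posrabbit, board, valeur+1)
--
--     return board
-- ===== SOURCE B (Python) =====
-- def mooveRabbitOnBoard(Posrabbit, board, valeur):
--     i = Posrabbit + valeur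
--     while board[i] != 0 and board[i] != 3:
--         i += 1
--     if board[i] == 0:
--         board[i] = board[Posrabbit]
--     board[Posrabbit] = 0
--     return board
-- ===== Notes on version B (the rewrite author's own statement) =====
-- stated objective: simpler
-- what changed: Replaced A's recursion (which re-dispatches the three branches at every call) by an iterative while-loop that first finds the stop index, then performs the single move/clear update once.
-- outside the precondition, e.g. on mooveRabbitOnBoard(0, [1, 1], 0): A raises IndexError, B raises IndexError
import Mathlib
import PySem

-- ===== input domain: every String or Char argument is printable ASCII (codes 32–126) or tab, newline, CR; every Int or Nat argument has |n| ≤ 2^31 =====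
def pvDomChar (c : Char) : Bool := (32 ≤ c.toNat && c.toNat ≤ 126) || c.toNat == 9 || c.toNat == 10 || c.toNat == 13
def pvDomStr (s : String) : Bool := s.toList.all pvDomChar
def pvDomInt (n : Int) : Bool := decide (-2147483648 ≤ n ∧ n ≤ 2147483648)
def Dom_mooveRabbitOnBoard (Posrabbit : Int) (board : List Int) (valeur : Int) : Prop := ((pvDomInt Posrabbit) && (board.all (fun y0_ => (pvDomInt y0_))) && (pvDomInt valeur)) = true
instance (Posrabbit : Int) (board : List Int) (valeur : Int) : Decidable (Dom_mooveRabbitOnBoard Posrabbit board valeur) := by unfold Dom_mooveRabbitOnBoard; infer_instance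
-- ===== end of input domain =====

-- B replaces A's recursive re-dispatch by an iterative scan for the stop index followed by one
-- update step (objective: simpler). Both A and B mutate `board` in place in Python; the
-- equivalence proved here is about the returned list value.

-- ===== PORT A =====
-- Fuel only makes the recursion total: Pre_ guarantees the scan stops within 2*len steps,
-- so the fuel 2*board.length+1 is never exhausted on admitted inputs.
def mooveRabbitOnBoardFuel (fuel : Nat) (Posrabbit : Int) (board : List Int) (valeur : Int) : List Int :=
  match fuel with
  | 0 => board
  | fuel + 1 =>
    match PySem.List.pyGet? board (Posrabbit + valeur) with
    | none => board                                   -- Python: IndexError (outside Pre_)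
    | some c =>
      if c = 0 then
        match PySem.List.pyGet? board Posrabbit with
        | none => board                               -- Python: IndexError (outside Pre_)
        | some r =>
          PySem.List.pySetD (PySem.List.pySetD board (Posrabbit + valeur) r) Posrabbit 0
      else if c = 3 then
        PySem.List.pySetD board Posrabbit 0
      else
        mooveRabbitOnBoardFuel fuel Posrabbit board (valeur + 1)

def mooveRabbitOnBoard (Posrabbit : Int) (board : List Int) (valeur : Int) : List Int :=
  mooveRabbitOnBoardFuel (2 * board.length + 1) Posrabbit board valeur

-- ===== PORT B =====
-- the while loop of Source B: advance i while board[i] is neither 0 nor 3 (fuel = totality guard only)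
def findStopIdx (board : List Int) (fuel : Nat) (i : Int) : Int :=
  match fuel with
  | 0 => i
  | fuel + 1 =>
    match PySem.List.pyGet? board i with
    | none => i                                       -- Python: IndexError (outside Pre_)
    | some c => if c ≠ 0 ∧ c ≠ 3 then findStopIdx board fuel (i + 1) else i

def mooveRabbitOnBoard_alt (Posrabbit : Int) (board : List Int) (valeur : Int) : List Int :=
  let i := findStopIdx board (2 * board.length + 1) (Posrabbit + valeur)
  let board' :=
    if PySem.List.pyGetD board i 0 = 0 then
      PySem.List.pySetD board i (PySem.List.pyGetD board Posrabbit 0)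
    else board
  PySem.List.pySetD board' Posrabbit 0

-- ===== PRECONDITION & SPEC =====
-- Pre_ = exactly the inputs where Python A returns (no IndexError): Posrabbit is a valid index,
-- and the forward scan from Posrabbit+valeur reaches a cell equal to 0 or 3 while every earlier
-- scanned cell exists and is neither 0 nor 3.
def Pre_mooveRabbitOnBoard (Posrabbit : Int) (board : List Int) (valeur : Int) : Prop :=
  PySem.Raise.InRange board.length Posrabbit ∧
  ∃ k : Nat, k ≤ 2 * board.length ∧
    (PySem.List.pyGet? board (Posrabbit + valeur + (k : Int)) = some 0 ∨
     PySem.List.pyGet? board (Posrabbit + valeur + (k : Int)) = some 3) ∧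
    ∀ j : Nat, j < k → ∃ c, PySem.List.pyGet? board (Posrabbit + valeur + (j : Int)) = some c ∧
      c ≠ 0 ∧ c ≠ 3

instance (Posrabbit : Int) (board : List Int) (valeur : Int) : Decidable (Pre_mooveRabbitOnBoard Posrabbit board valeur) := by
  unfold Pre_mooveRabbitOnBoard; infer_instance

def pvWitness_mooveRabbitOnBoard : Int × List Int × Int := (0, [1, 0], 1)

def Spec_mooveRabbitOnBoard (Posrabbit : Int) (board : List Int) (valeur : Int) (out : List Int) : Prop := out = mooveRabbitOnBoard_alt Posrabbit board valeur
instance (Posrabbit : Int) (board : List Int) (valeur : Int) (out : List Int) : Decidable (Spec_mooveRabbitOnBoard Posrabbit board valeur out) := by unfold Spec_mooveRabbitOnBoard; infer_instance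

-- ===== CLAIM (what is proved, stated in full; the proofs are below) =====
def Claim_equal_mooveRabbitOnBoard : Prop := ∀ (Posrabbit : Int) (board : List Int) (valeur : Int), Dom_mooveRabbitOnBoard Posrabbit board valeur → Pre_mooveRabbitOnBoard Posrabbit board valeur → Spec_mooveRabbitOnBoard Posrabbit board valeur (mooveRabbitOnBoard Posrabbit board valeur)

-- ===== LEMMAS AND PROOFS =====

-- the final one-shot update step of B
def finalStep (board : List Int) (Posrabbit i : Int) : List Int :=
  PySem.List.pySetD
    (if PySem.List.pyGetD board i 0 = 0 then
      PySem.List.pySetD board i (PySem.List.pyGetD board Posrabbit 0)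
     else board) Posrabbit 0

lemma findStopIdx_stop (board : List Int) (k : Nat) :
    ∀ (fuel : Nat) (i : Int), k < fuel →
    (PySem.List.pyGet? board (i + (k : Int)) = some 0 ∨
     PySem.List.pyGet? board (i + (k : Int)) = some 3) →
    (∀ j : Nat, j < k → ∃ c, PySem.List.pyGet? board (i + (j : Int)) = some c ∧ c ≠ 0 ∧ c ≠ 3) →
    findStopIdx board fuel i = i + (k : Int) := by
  induction k with
  | zero =>
    intro fuel i hf hstop _
    match fuel, hf with
    | fuel + 1, _ =>
      simp only [Int.natCast_zero, Int.add_zero] at hstop ⊢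
      unfold findStopIdx
      rcases hstop with h | h <;> simp [h]
  | succ k ih =>
    intro fuel i hf hstop hblk
    match fuel, hf with
    | fuel + 1, hf =>
      obtain ⟨c, hc, hc0, hc3⟩ := hblk 0 (Nat.succ_pos k)
      simp only [Int.natCast_zero, Int.add_zero] at hc
      unfold findStopIdx
      rw [hc]
      simp only [hc0, hc3, ne_eq, not_false_iff, and_self, if_true]
      have := ih fuel (i + 1) (by omega)
        (by rw [show i + 1 + (k : Int) = i + ((k + 1 : Nat) : Int) by push_cast; ring]; exact hstop)
        (fun j hj => by
          obtain ⟨c', hc', h0, h3⟩ := hblk (j + 1) (by omega)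
          exact ⟨c', by rw [show i + 1 + (j : Int) = i + ((j + 1 : Nat) : Int) by push_cast; ring]; exact hc', h0, h3⟩)
      rw [this]; push_cast; ring

lemma mooveFuel_eq_finalStep (board : List Int) (Posrabbit : Int)
    (hPos : PySem.Raise.InRange board.length Posrabbit) (k : Nat) :
    ∀ (fuel : Nat) (valeur : Int), k < fuel →
    (PySem.List.pyGet? board (Posrabbit + valeur + (k : Int)) = some 0 ∨
     PySem.List.pyGet? board (Posrabbit + valeur + (k : Int)) = some 3) →
    (∀ j : Nat, j < k → ∃ c, PySem.List.pyGet? board (Posrabbit + valeur + (j : Int)) = some c ∧ c ≠ 0 ∧ c ≠ 3) →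
    mooveRabbitOnBoardFuel fuel Posrabbit board valeur =
      finalStep board Posrabbit (Posrabbit + valeur + (k : Int)) := by
  have hPosGet : ∃ r, PySem.List.pyGet? board Posrabbit = some r := by
    cases h : PySem.List.pyGet? board Posrabbit with
    | some r => exact ⟨r, rfl⟩
    | none => exact absurd hPos ((PySem.List.pyGet?_eq_none_iff board Posrabbit).mp h)
  induction k with
  | zero =>
    intro fuel valeur hf hstop _
    match fuel, hf with
    | fuel + 1, _ =>
      simp only [Int.natCast_zero, Int.add_zero] at hstop ⊢
      unfold mooveRabbitOnBoardFuel finalStep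
      have hGetD : PySem.List.pyGetD board (Posrabbit + valeur) 0 =
          ((PySem.List.pyGet? board (Posrabbit + valeur)).getD 0) := by
        simp [PySem.List.pyGetD, PySem.List.pyGet?]
      obtain ⟨r, hr⟩ := hPosGet
      have hrD : PySem.List.pyGetD board Posrabbit 0 = r := by
        simp [PySem.List.pyGetD, PySem.List.pyGet?] at hr ⊢
        simp [hr]
      rcases hstop with h | h <;> rw [h] <;> simp [hGetD, h, hr, hrD]
  | succ k ih =>
    intro fuel valeur hf hstop hblk
    match fuel, hf with
    | fuel + 1, hf =>
      obtain ⟨c, hc, hc0, hc3⟩ := hblk 0 (Nat.succ_pos k)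
      simp only [Int.natCast_zero, Int.add_zero] at hc
      unfold mooveRabbitOnBoardFuel
      rw [hc]
      simp only [hc0, hc3, if_false]
      have := ih fuel (valeur + 1) (by omega)
        (by rw [show Posrabbit + (valeur + 1) + (k : Int) = Posrabbit + valeur + ((k + 1 : Nat) : Int) by push_cast; ring]; exact hstop)
        (fun j hj => by
          obtain ⟨c', hc', h0, h3⟩ := hblk (j + 1) (by omega)
          exact ⟨c', by rw [show Posrabbit + (valeur + 1) + (j : Int) = Posrabbit + valeur + ((j + 1 : Nat) : Int) by push_cast; ring]; exact hc', h0, h3⟩)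
      rw [this]
      congr 1
      push_cast; ring

-- ===== VERDICT (by name: the statement is the Claim_ definition above) =====
theorem mooveRabbitOnBoard_spec : Claim_equal_mooveRabbitOnBoard := by
  intro Posrabbit board valeur _ hPre
  obtain ⟨hPos, k, hk, hstop, hblk⟩ := hPre
  unfold Spec_mooveRabbitOnBoard mooveRabbitOnBoard mooveRabbitOnBoard_alt
  rw [mooveFuel_eq_finalStep board Posrabbit hPos k (2 * board.length + 1) valeur (by omega) hstop hblk]
  rw [findStopIdx_stop board k (2 * board.length + 1) (Posrabbit + valeur) (by omega) hstop hblk]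
  rfl
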